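-- pv_equiv track=rewrite | github.com/alexandrucosminmihai/web-diff-crawler | webDiffCrawler/webDiffCrawler/spiders/webDiffCrawler.py | extractTagsIntervals
-- ===== SOURCE A (Python) =====
-- def extractTagsIntervals(content):
--     sol = [] # An array of tag intervals (represented as arrays of dim 2)
--     for i in range(len(content)):
--         if content[i] == '<':
--             sol.append([i])
--         elif content[i] == '>':
--             if len(sol) == 0:
--                 continue
--             if len(sol[-1]) >= 2:
--                 continue
--
--             sol[-1].append(i)
--
--     return sol
-- ===== SOURCE B (Python) =====
-- def extractTagsIntervals(content):
--     n = len(content)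
--     opens = [i for i, c in enumerate(content) if c == '<']
--     closes = [i for i, c in enumerate(content) if c == '>']
--     sol = []
--     for p, q in zip(opens, opens[1:] + [n]):
--         # advance past closes at or before this open
--         while closes and closes[0] <= p:
--             closes.pop(0)
--         if closes and closes[0] < q:
--             sol.append([p, closes[0]])
--         else:
--             sol.append([p])
--     return sol
-- ===== Notes on version B (the rewrite author's own statement) =====
-- stated objective: alternative
-- what changed: B first collects the index lists of all '<' and all '>' in two comprehension passes, then pairs each open index with the next open index and picks the matching close by a two-pointer merge over the close list, instead of A's single stateful scan that appends to and mutates the last interval in place.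
import Mathlib
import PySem

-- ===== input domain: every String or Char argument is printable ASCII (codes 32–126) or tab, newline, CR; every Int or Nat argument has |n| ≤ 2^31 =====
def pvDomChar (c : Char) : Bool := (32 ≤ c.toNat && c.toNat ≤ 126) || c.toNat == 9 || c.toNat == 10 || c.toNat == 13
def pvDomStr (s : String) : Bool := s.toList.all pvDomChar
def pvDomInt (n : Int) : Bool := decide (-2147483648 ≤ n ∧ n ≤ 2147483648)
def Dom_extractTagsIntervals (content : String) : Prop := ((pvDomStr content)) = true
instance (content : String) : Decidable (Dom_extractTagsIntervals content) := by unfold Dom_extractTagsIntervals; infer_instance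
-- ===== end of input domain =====

-- B replaces A's single stateful scan (mutating the last interval) by collecting the '<' and '>'
-- index lists first and pairing them with a two-pointer merge; same cost, alternative algorithm.

-- ===== PORT A =====
-- A's `for i in range(len(content))` with `content[i]` is ported as a fold over the
-- (index, character) pairs of the string — the same indices and the same characters.
def extractTagsIntervals (content : String) : List (List Int) :=
  (PySem.List.enumerate content.toList 0).foldl
    (fun sol ic =>
      if ic.2 = '<' then sol ++ [[ic.1]]
      else if ic.2 = '>' then
        match sol.getLast? with
        | none => sol                                  -- len(sol) == 0: continue
        | some last =>
          if 2 ≤ last.length then sol                  -- len(sol[-1]) >= 2: continue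
          else sol.dropLast ++ [last ++ [ic.1]]        -- sol[-1].append(i)
      else sol) []

-- ===== PORT B =====
-- Source B's `while closes and closes[0] <= p: closes.pop(0)` is exactly dropWhile (· ≤ p).
def extractTagsIntervals_alt (content : String) : List (List Int) :=
  let n : Int := content.toList.length
  let e := PySem.List.enumerate content.toList 0
  let opens := (e.filter (fun ic => ic.2 = '<')).map (·.1)
  let closes := (e.filter (fun ic => ic.2 = '>')).map (·.1)
  ((opens.zip (opens.drop 1 ++ [n])).foldl
    (fun st pq =>
      let cl := st.1.dropWhile (fun k => k ≤ pq.1)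
      match cl with
      | [] => (cl, st.2 ++ [[pq.1]])
      | k :: _ => if k < pq.2 then (cl, st.2 ++ [[pq.1, k]]) else (cl, st.2 ++ [[pq.1]]))
    (closes, [])).2

-- ===== PRECONDITION & SPEC =====
def Spec_extractTagsIntervals (content : String) (out : List (List Int)) : Prop := out = extractTagsIntervals_alt content
instance (content : String) (out : List (List Int)) : Decidable (Spec_extractTagsIntervals content out) := by unfold Spec_extractTagsIntervals; infer_instance

-- ===== CLAIM (what is proved, stated in full; the proofs are below) =====
def Claim_equal_extractTagsIntervals : Prop := ∀ (content : String), Dom_extractTagsIntervals content → Spec_extractTagsIntervals content (extractTagsIntervals content)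

-- ===== LEMMAS AND PROOFS =====

-- Reference recursion: the list of tag intervals of the remaining (index, char) pairs,
-- with state `none` (no open interval) or `some p` (an interval opened at p).
def pvSpec (st : Option Int) : List (Int × Char) → List (List Int)
  | [] => match st with | none => [] | some p => [[p]]
  | ic :: rest =>
    match st with
    | none => if ic.2 = '<' then pvSpec (some ic.1) rest else pvSpec none rest
    | some p =>
      if ic.2 = '<' then [p] :: pvSpec (some ic.1) rest
      else if ic.2 = '>' then [p, ic.1] :: pvSpec none rest
      else pvSpec (some p) rest

def pvStepA (sol : List (List Int)) (ic : Int × Char) : List (List Int) :=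
  if ic.2 = '<' then sol ++ [[ic.1]]
  else if ic.2 = '>' then
    match sol.getLast? with
    | none => sol
    | some last => if 2 ≤ last.length then sol else sol.dropLast ++ [last ++ [ic.1]]
  else sol

def pvClosed (sol : List (List Int)) : Prop :=
  sol = [] ∨ ∃ x, sol.getLast? = some x ∧ 2 ≤ x.length

theorem pvFoldA_both (l : List (Int × Char)) :
    (∀ sol, pvClosed sol → l.foldl pvStepA sol = sol ++ pvSpec none l) ∧
    (∀ sol p, l.foldl pvStepA (sol ++ [[p]]) = sol ++ pvSpec (some p) l) := by
  induction l with
  | nil => simp [pvSpec]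
  | cons ic rest ih =>
    constructor
    · intro sol hc
      by_cases h1 : ic.2 = '<'
      · have hstep : pvStepA sol ic = sol ++ [[ic.1]] := by simp [pvStepA, h1]
        simp only [List.foldl_cons, hstep]
        rw [ih.2 sol ic.1]
        simp [pvSpec, h1]
      · by_cases h2 : ic.2 = '>'
        · have hstep : pvStepA sol ic = sol := by
            rcases hc with h | ⟨x, hx, hlen⟩
            · simp [pvStepA, h2, h]
            · simp [pvStepA, h2, hx, hlen]
          simp only [List.foldl_cons, hstep, pvSpec, h2]
          rw [ih.1 sol hc]
          simp
        · have hstep : pvStepA sol ic = sol := by simp [pvStepA, h1, h2]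
          simp only [List.foldl_cons, hstep]
          rw [ih.1 sol hc]
          simp [pvSpec, h1]
    · intro sol p
      by_cases h1 : ic.2 = '<'
      · have hstep : pvStepA (sol ++ [[p]]) ic = (sol ++ [[p]]) ++ [[ic.1]] := by
          simp [pvStepA, h1]
        simp only [List.foldl_cons, hstep]
        rw [ih.2 (sol ++ [[p]]) ic.1]
        simp [pvSpec, h1]
      · by_cases h2 : ic.2 = '>'
        · have hstep : pvStepA (sol ++ [[p]]) ic = sol ++ [[p, ic.1]] := by
            simp [pvStepA, h2]
          simp only [List.foldl_cons, hstep]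
          rw [ih.1 (sol ++ [[p, ic.1]]) (Or.inr ⟨[p, ic.1], by simp, by simp⟩)]
          simp [pvSpec, h2]
        · have hstep : pvStepA (sol ++ [[p]]) ic = sol ++ [[p]] := by
            simp [pvStepA, h1, h2]
          simp only [List.foldl_cons, hstep]
          rw [ih.2 sol p]
          simp [pvSpec, h1, h2]

-- the first close strictly after p, if it is before q, closes the interval opened at p
def pvInterval (p q : Int) (cl : List Int) : List Int :=
  match (cl.filter (fun k => p < k)).head? with
  | some k => if k < q then [p, k] else [p]
  | none => [p]

def pvOpens (l : List (Int × Char)) : List Int := (l.filter (fun ic => ic.2 = '<')).map (·.1)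
def pvCloses (l : List (Int × Char)) : List Int := (l.filter (fun ic => ic.2 = '>')).map (·.1)

theorem pvDropWhile_sorted (cl : List Int) (hcl : cl.Pairwise (· ≤ ·)) (p : Int) :
    cl.dropWhile (fun k => k ≤ p) = cl.filter (fun k => p < k) := by
  induction cl with
  | nil => rfl
  | cons a t ih =>
    rcases List.pairwise_cons.mp hcl with ⟨ha, ht⟩
    by_cases h : a ≤ p
    · simp only [List.dropWhile_cons, List.filter_cons, h, decide_true, if_true]
      have : ¬ p < a := not_lt.mpr h
      simp [this, ih ht]
    · have hpa : p < a := not_le.mp h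
      simp only [List.dropWhile_cons, List.filter_cons, decide_eq_true_eq, h, if_false, hpa,
        decide_true, if_true]
      rw [List.filter_eq_self.mpr]
      intro x hx
      exact decide_eq_true (lt_of_lt_of_le hpa (ha x hx))

theorem pvInterval_filter (p q p' : Int) (cl : List Int) (h : p' ≤ p) :
    pvInterval p q (cl.filter (fun k => p' < k)) = pvInterval p q cl := by
  unfold pvInterval
  have : (cl.filter (fun k => p' < k)).filter (fun k => p < k) = cl.filter (fun k => p < k) := by
    rw [List.filter_filter]
    apply List.filter_congr
    intro a _
    by_cases hpa : p < a
    · have : p' < a := lt_of_le_of_lt h hpa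
      simp [hpa, this]
    · simp [hpa]
  rw [this]

theorem pvFoldB (pqs : List (Int × Int)) (cl : List Int) (sol : List (List Int))
    (hcl : cl.Pairwise (· ≤ ·)) (hpq : pqs.Pairwise (fun a b => a.1 ≤ b.1)) :
    (pqs.foldl
      (fun st pq =>
        let c := st.1.dropWhile (fun k => k ≤ pq.1)
        match c with
        | [] => (c, st.2 ++ [[pq.1]])
        | k :: _ => if k < pq.2 then (c, st.2 ++ [[pq.1, k]]) else (c, st.2 ++ [[pq.1]]))
      (cl, sol)).2 = sol ++ pqs.map (fun pq => pvInterval pq.1 pq.2 cl) := by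
  induction pqs generalizing cl sol with
  | nil => simp
  | cons pq pqs ih =>
    rcases List.pairwise_cons.mp hpq with ⟨hhead, htail⟩
    have hdw := pvDropWhile_sorted cl hcl pq.1
    have hcl' : (cl.filter (fun k => pq.1 < k)).Pairwise (fun a b => a ≤ b) :=
      List.Pairwise.filter _ hcl
    have hmap : pqs.map (fun pq' => pvInterval pq'.1 pq'.2 (cl.filter (fun k => pq.1 < k)))
        = pqs.map (fun pq' => pvInterval pq'.1 pq'.2 cl) := by
      apply List.map_congr_left
      intro pq' h'
      exact pvInterval_filter pq'.1 pq'.2 pq.1 cl (hhead pq' h')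
    simp only [List.foldl_cons]
    cases hfc : cl.filter (fun k => pq.1 < k) with
    | nil =>
      simp only [hdw, hfc]
      rw [hfc] at hcl' hmap
      rw [ih [] (sol ++ [[pq.1]]) hcl' htail, hmap]
      have hint : pvInterval pq.1 pq.2 cl = [pq.1] := by unfold pvInterval; rw [hfc]; rfl
      simp [hint]
    | cons k ks =>
      simp only [hdw, hfc]
      rw [hfc] at hcl' hmap
      have hint : pvInterval pq.1 pq.2 cl
          = if k < pq.2 then [pq.1, k] else [pq.1] := by unfold pvInterval; rw [hfc]; rfl
      by_cases hk : k < pq.2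
      · simp only [hk, if_true]
        rw [ih (k :: ks) (sol ++ [[pq.1, k]]) hcl' htail, hmap]
        simp [hint, hk]
      · simp only [hk, if_false]
        rw [ih (k :: ks) (sol ++ [[pq.1]]) hcl' htail, hmap]
        simp [hint, hk]

theorem pvOpens_cons (ic : Int × Char) (rest : List (Int × Char)) :
    pvOpens (ic :: rest) = if ic.2 = '<' then ic.1 :: pvOpens rest else pvOpens rest := by
  by_cases h : ic.2 = '<' <;> simp [pvOpens, h]

theorem pvCloses_cons (ic : Int × Char) (rest : List (Int × Char)) :
    pvCloses (ic :: rest) = if ic.2 = '>' then ic.1 :: pvCloses rest else pvCloses rest := by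
  by_cases h : ic.2 = '>' <;> simp [pvCloses, h]

theorem pvMem_fst {c : Char} {l : List (Int × Char)} {k : Int}
    (h : k ∈ (l.filter (fun ic => ic.2 = c)).map (·.1)) : ∃ x ∈ l, x.1 = k := by
  simp only [List.mem_map, List.mem_filter] at h
  obtain ⟨x, ⟨hx, _⟩, hk⟩ := h
  exact ⟨x, hx, hk⟩

theorem pvZipTail_cons (a n : Int) (o : List Int) :
    (a :: o).zip (o ++ [n]) = (a, o.head?.getD n) :: o.zip (o.tail ++ [n]) := by
  cases o <;> simp [List.zip]

theorem pvK (n : Int) (l : List (Int × Char)) : ∀ p, l.Pairwise (fun a b => a.1 < b.1) →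
    (∀ x ∈ l, p < x.1) → (∀ x ∈ l, x.1 < n) →
    pvSpec (some p) l = pvInterval p ((pvOpens l).head?.getD n) (pvCloses l) :: pvSpec none l := by
  induction l with
  | nil => intro p _ _ _; simp [pvSpec, pvCloses, pvInterval]
  | cons ic rest ih =>
    intro p hp hlo hn
    rcases List.pairwise_cons.mp hp with ⟨hic, hrest⟩
    by_cases h1 : ic.2 = '<'
    · have hint : pvInterval p ic.1 (pvCloses rest) = [p] := by
        unfold pvInterval
        cases hfl : (pvCloses rest).filter (fun k => p < k) with
        | nil => rfl
        | cons k ks =>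
          have hk : k ∈ pvCloses rest := List.mem_of_mem_filter (hfl ▸ List.mem_cons_self)
          obtain ⟨x, hx, hxk⟩ := pvMem_fst (c := '>') hk
          have : ¬ k < ic.1 := not_lt.mpr (le_of_lt (hxk ▸ hic x hx))
          simp [this]
      simp [pvSpec, h1, pvOpens_cons, pvCloses_cons, hint]
    · by_cases h2 : ic.2 = '>'
      · have hq : ic.1 < (pvOpens rest).head?.getD n := by
          cases ho : pvOpens rest with
          | nil => simpa using hn ic List.mem_cons_self
          | cons j js =>
            obtain ⟨x, hx, hxj⟩ := pvMem_fst (c := '<') (ho ▸ List.mem_cons_self)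
            simpa using hxj ▸ hic x hx
        have hint : pvInterval p ((pvOpens rest).head?.getD n) (ic.1 :: pvCloses rest)
            = [p, ic.1] := by
          have hpic : p < ic.1 := hlo ic List.mem_cons_self
          unfold pvInterval
          rw [List.filter_cons]
          simp [hpic, hq]
        simp [pvSpec, h2, pvOpens_cons, pvCloses_cons, hint]
      · have := ih p hrest (fun x hx => hlo x (List.mem_cons_of_mem _ hx))
          (fun x hx => hn x (List.mem_cons_of_mem _ hx))
        simp [pvSpec, h1, h2, pvOpens_cons, pvCloses_cons, this]

theorem pvMain (n : Int) (l : List (Int × Char))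
    (hp : l.Pairwise (fun a b => a.1 < b.1)) (hn : ∀ x ∈ l, x.1 < n) :
    pvSpec none l =
      ((pvOpens l).zip ((pvOpens l).drop 1 ++ [n])).map
        (fun pq => pvInterval pq.1 pq.2 (pvCloses l)) := by
  induction l with
  | nil => simp [pvSpec, pvOpens, pvCloses]
  | cons ic rest ih =>
    rcases List.pairwise_cons.mp hp with ⟨hic, hrest⟩
    have hn' : ∀ x ∈ rest, x.1 < n := fun x hx => hn x (List.mem_cons_of_mem _ hx)
    by_cases h1 : ic.2 = '<'
    · have hk := pvK n rest ic.1 hrest hic hn'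
      rw [ih hrest hn'] at hk
      simp [pvSpec, h1, pvOpens_cons, pvCloses_cons, hk]
      rw [pvZipTail_cons, List.map_cons]
    · have := ih hrest hn'
      simp [pvSpec, h1, pvOpens_cons, this]
      intro a b hab
      by_cases h2 : ic.2 = '>'
      · obtain ⟨x, hx, hxa⟩ := pvMem_fst (c := '<') ((List.of_mem_zip hab).1)
        have hia : ¬ a < ic.1 := not_lt.mpr (le_of_lt (hxa ▸ hic x hx))
        simp [pvCloses_cons, h2, pvInterval, hia]
      · simp [pvCloses_cons, h2]

-- ===== VERDICT (by name: the statement is the Claim_ definition above) =====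
theorem extractTagsIntervals_spec : Claim_equal_extractTagsIntervals := by
  intro content _
  unfold Spec_extractTagsIntervals
  have hpe : (PySem.List.enumerate content.toList 0).Pairwise (fun a b => a.1 < b.1) :=
    PySem.List.pairwise_lt_enumerate content.toList 0
  have hOplt : (pvOpens (PySem.List.enumerate content.toList 0)).Pairwise (· < ·) :=
    (List.pairwise_map).mpr (List.Pairwise.filter _ hpe)
  have hCl : (pvCloses (PySem.List.enumerate content.toList 0)).Pairwise (· ≤ ·) :=
    ((List.pairwise_map).mpr (List.Pairwise.filter _ hpe)).imp (fun h => le_of_lt h)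
  have hzip : ∀ o : List Int, o.Pairwise (· < ·) →
      (o.zip (o.drop 1 ++ [(content.toList.length : Int)])).Pairwise (fun a b => a.1 ≤ b.1) := by
    intro o ho
    have h1 : ((o.zip (o.drop 1 ++ [(content.toList.length : Int)])).map Prod.fst).Pairwise
        (· ≤ ·) := by
      cases o with
      | nil => simp
      | cons a t =>
        rw [List.map_fst_zip]
        · exact ho.imp (fun h => le_of_lt h)
        · simp
    exact (List.pairwise_map).mp h1
  have hn : ∀ x ∈ PySem.List.enumerate content.toList 0,
      x.1 < (content.toList.length : Int) := by
    intro x hx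
    rw [PySem.List.mem_enumerate_iff] at hx
    obtain ⟨k, hk, rfl⟩ := hx
    simpa using hk
  have hM := pvMain (content.toList.length : Int) (PySem.List.enumerate content.toList 0) hpe hn
  have hA : extractTagsIntervals content
      = [] ++ pvSpec none (PySem.List.enumerate content.toList 0) :=
    (pvFoldA_both (PySem.List.enumerate content.toList 0)).1 [] (Or.inl rfl)
  have hB : extractTagsIntervals_alt content
      = [] ++ ((pvOpens (PySem.List.enumerate content.toList 0)).zip
            ((pvOpens (PySem.List.enumerate content.toList 0)).drop 1
              ++ [(content.toList.length : Int)])).map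
          (fun pq => pvInterval pq.1 pq.2 (pvCloses (PySem.List.enumerate content.toList 0))) :=
    pvFoldB _ _ [] hCl (hzip _ hOplt)
  rw [hA, hB, List.nil_append, List.nil_append, hM]
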